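-- pv_equiv track=rewrite | github.com/miskamvedebel/algorithms | greedy/moving_balls.py | moving_balls
-- ===== SOURCE A (Python) =====
-- def moving_balls(boxes: str) -> list:
--     n = len(boxes)
--     res = [0] * n
--     for i in range(n):
--         for j in range(n):
--             if i != j and boxes[j] == '1':
--                 res[i] += abs(i-j)
--     return res
-- ===== SOURCE B (Python) =====
-- def moving_balls(boxes: str) -> list:
--     n = len(boxes)
--     left = [0] * n
--     cnt = cost = 0
--     for i in range(n):
--         left[i] = cost
--         if boxes[i] == '1':
--             cnt += 1
--         cost += cnt
--     res = [0] * n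
--     cnt = cost = 0
--     for i in range(n - 1, -1, -1):
--         res[i] = left[i] + cost
--         if boxes[i] == '1':
--             cnt += 1
--         cost += cnt
--     return res
-- ===== Notes on version B (the rewrite author's own statement) =====
-- stated objective: faster
-- what changed: Replaced the nested all-pairs distance loop by two linear sweeps (left-to-right and right-to-left) that carry a running ball count and running distance cost.
import Mathlib
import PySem

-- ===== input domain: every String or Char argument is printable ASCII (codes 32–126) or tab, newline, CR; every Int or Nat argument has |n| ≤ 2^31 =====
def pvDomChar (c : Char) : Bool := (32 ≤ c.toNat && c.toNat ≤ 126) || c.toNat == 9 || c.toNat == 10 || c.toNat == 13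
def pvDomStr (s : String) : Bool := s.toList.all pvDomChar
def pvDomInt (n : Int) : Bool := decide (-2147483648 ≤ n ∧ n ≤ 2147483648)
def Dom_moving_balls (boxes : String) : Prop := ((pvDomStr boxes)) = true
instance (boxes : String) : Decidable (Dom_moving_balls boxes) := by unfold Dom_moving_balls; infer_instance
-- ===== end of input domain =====

-- B replaces A's quadratic all-pairs distance loops by two linear sweeps with a
-- running ball count and running cost (objective: faster, asymptotically).

-- ===== PORT A =====
-- literal port: res[i] is accumulated by the inner j-loop; the outer loop fills each slot
def moving_balls (boxes : String) : List Int :=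
  let cs := boxes.toList
  let n := cs.length
  (List.range n).map (fun i =>
    (List.range n).foldl (fun acc j =>
      if i ≠ j ∧ cs.getD j ' ' = '1' then acc + |(i : Int) - (j : Int)| else acc) 0)

-- ===== PORT B =====
-- first (left-to-right) pass of Source B: emits the running cost, then updates cnt and cost
def mbSweep : List Char → Int → Int → List Int
  | [], _, _ => []
  | c :: rest, cnt, cost =>
      let cnt' := if c = '1' then cnt + 1 else cnt
      cost :: mbSweep rest cnt' (cost + cnt')

-- second (right-to-left) pass of Source B: walks the (char, left-value) pairs from the right,
-- emitting left[i] + cost; the traversal is realised as recursion over the reversed pairs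
def mbSweep2 : List (Char × Int) → Int → Int → List Int
  | [], _, _ => []
  | (c, l) :: rest, cnt, cost =>
      let cnt' := if c = '1' then cnt + 1 else cnt
      (l + cost) :: mbSweep2 rest cnt' (cost + cnt')

def moving_balls_alt (boxes : String) : List Int :=
  let cs := boxes.toList
  let left := mbSweep cs 0 0
  (mbSweep2 (List.zip cs left).reverse 0 0).reverse

-- ===== PRECONDITION & SPEC =====
def Spec_moving_balls (boxes : String) (out : List Int) : Prop := out = moving_balls_alt boxes
instance (boxes : String) (out : List Int) : Decidable (Spec_moving_balls boxes out) := by unfold Spec_moving_balls; infer_instance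

-- ===== CLAIM (what is proved, stated in full; the proofs are below) =====
def Claim_equal_moving_balls : Prop := ∀ (boxes : String), Dom_moving_balls boxes → Spec_moving_balls boxes (moving_balls boxes)

-- ===== LEMMAS AND PROOFS =====

-- cost to bring all balls strictly left of position i to position i
def mbP (cs : List Char) (i : Nat) : Int :=
  ∑ j ∈ Finset.range i, if cs.getD j ' ' = '1' then (i : Int) - (j : Int) else 0

-- cost to bring all balls strictly right of position i to position i
def mbQ (cs : List Char) (i : Nat) : Int :=
  ∑ j ∈ Finset.range cs.length, if i < j ∧ cs.getD j ' ' = '1' then (j : Int) - (i : Int) else 0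

theorem mbSweep_length (cs : List Char) (cnt cost : Int) :
    (mbSweep cs cnt cost).length = cs.length := by
  induction cs generalizing cnt cost with
  | nil => rfl
  | cons c rest ih => simp [mbSweep, ih]

theorem mbP_succ (c : Char) (rest : List Char) (i : Nat) :
    mbP (c :: rest) (i + 1) = (if c = '1' then (i : Int) + 1 else 0) + mbP rest i := by
  unfold mbP
  rw [Finset.sum_range_succ']
  have hs : (∑ x ∈ Finset.range i,
        if (c :: rest).getD (x + 1) ' ' = '1' then ((i + 1 : Nat) : Int) - ((x + 1 : Nat) : Int) else 0)
      = ∑ j ∈ Finset.range i, if rest.getD j ' ' = '1' then (i : Int) - (j : Int) else 0 := by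
    apply Finset.sum_congr rfl
    intro j _
    simp only [List.getD_cons_succ]
    split <;> [push_cast; rfl]
    ring
  rw [hs]
  simp only [List.getD_cons_zero, Nat.cast_zero, sub_zero]
  split <;> push_cast <;> ring

theorem mbSweep_getElem (cs : List Char) (cnt cost : Int) (i : Nat) (h : i < cs.length) :
    (mbSweep cs cnt cost)[i]'(by rw [mbSweep_length]; exact h) =
      cost + (i : Int) * cnt + mbP cs i := by
  induction cs generalizing cnt cost i with
  | nil => simp at h
  | cons c rest ih =>
    cases i with
    | zero => simp [mbSweep, mbP]
    | succ i =>
      have h' : i < rest.length := by simpa using h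
      have := ih (if c = '1' then cnt + 1 else cnt)
        (cost + (if c = '1' then cnt + 1 else cnt)) i h'
      simp only [mbSweep, List.getElem_cons_succ] at *
      rw [this, mbP_succ]
      split <;> push_cast <;> ring

-- extend the range-i sum of mbP to a range-n sum
theorem mbP_ext (cs : List Char) (i n : Nat) (h : i ≤ n) :
    (∑ j ∈ Finset.range n, if j < i ∧ cs.getD j ' ' = '1' then (i : Int) - (j : Int) else 0)
      = mbP cs i := by
  unfold mbP
  have hsub : Finset.range i ⊆ Finset.range n := by
    intro x hx
    simp only [Finset.mem_range] at *
    omega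
  have hvan : ∀ j ∈ Finset.range n, j ∉ Finset.range i →
      (if j < i ∧ cs.getD j ' ' = '1' then (i : Int) - (j : Int) else 0) = 0 := by
    intro j _ hj
    have : ¬ j < i := by simpa using hj
    simp [this]
  rw [← Finset.sum_subset hsub hvan]
  apply Finset.sum_congr rfl
  intro j hj
  have hji : j < i := Finset.mem_range.mp hj
  simp [hji]

-- A's inner loop computes mbP + mbQ
theorem foldl_range_if (n : Nat) (C : Nat → Prop) [DecidablePred C] (v : Nat → Int) (a : Int) :
    (List.range n).foldl (fun acc j => if C j then acc + v j else acc) a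
      = a + ∑ j ∈ Finset.range n, if C j then v j else 0 := by
  induction n generalizing a with
  | zero => simp
  | succ n ih =>
    rw [List.range_succ, List.foldl_append, ih, Finset.sum_range_succ]
    simp only [List.foldl_cons, List.foldl_nil]
    split <;> ring

-- A's inner loop computes mbP + mbQ
theorem mbA_entry (cs : List Char) (i : Nat) (h : i < cs.length) :
    (List.range cs.length).foldl (fun acc j =>
        if i ≠ j ∧ cs.getD j ' ' = '1' then acc + |(i : Int) - (j : Int)| else acc) 0
      = mbP cs i + mbQ cs i := by
  rw [foldl_range_if cs.length (fun j => i ≠ j ∧ cs.getD j ' ' = '1')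
      (fun j => |(i : Int) - (j : Int)|) 0, zero_add]
  rw [← mbP_ext cs i cs.length (le_of_lt h)]
  unfold mbQ
  rw [← Finset.sum_add_distrib]
  apply Finset.sum_congr rfl
  intro j _
  by_cases hc : cs.getD j ' ' = '1'
  · rcases lt_trichotomy i j with hij | rfl | hij
    · have habs : |(i : Int) - (j : Int)| = (j : Int) - (i : Int) := by
        rw [abs_sub_comm]; apply abs_of_nonneg; omega
      have h1 : i ≠ j := Nat.ne_of_lt hij
      have h2 : ¬ j < i := Nat.lt_asymm hij
      simp [h1, h2, hij, habs]
    · simp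
    · have habs : |(i : Int) - (j : Int)| = (i : Int) - (j : Int) := by
        apply abs_of_nonneg; omega
      have h1 : i ≠ j := (Nat.ne_of_lt hij).symm
      have h2 : ¬ i < j := Nat.lt_asymm hij
      simp [h1, h2, hij, habs]
  · simp only [List.getD_eq_getElem?_getD] at hc
    simp [hc]

-- the reversed sweep entry is the right-side cost
theorem mbGetD_reverse (cs : List Char) (j : Nat) (h : j < cs.length) :
    cs.reverse.getD j ' ' = cs.getD (cs.length - 1 - j) ' ' := by
  rw [List.getD_eq_getElem?_getD, List.getD_eq_getElem?_getD, List.getElem?_reverse h]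

-- the reversed sweep entry is the right-side cost
theorem mbP_reverse (cs : List Char) (i : Nat) (h : i < cs.length) :
    mbP cs.reverse (cs.length - 1 - i) = mbQ cs i := by
  have hm : cs.length - 1 - i ≤ cs.length := by omega
  rw [← mbP_ext cs.reverse (cs.length - 1 - i) cs.length hm]
  unfold mbQ
  apply Finset.sum_nbij' (fun j => cs.length - 1 - j) (fun j => cs.length - 1 - j)
  · intro j hj
    simp only [Finset.mem_range] at *
    omega
  · intro j hj
    simp only [Finset.mem_range] at *
    omega
  · intro j hj
    simp only [Finset.mem_range] at hj
    omega
  · intro j hj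
    simp only [Finset.mem_range] at hj
    omega
  · intro j hj
    simp only [Finset.mem_range] at hj
    rw [mbGetD_reverse cs j hj]
    by_cases hc : cs.getD (cs.length - 1 - j) ' ' = '1'
    · simp only [hc, and_true]
      split <;> split <;> omega
    · simp only [List.getD_eq_getElem?_getD] at hc
      simp [hc]

theorem mbSweep2_eq (ps : List (Char × Int)) (cnt cost : Int) :
    mbSweep2 ps cnt cost =
      List.zipWith (· + ·) (ps.map Prod.snd) (mbSweep (ps.map Prod.fst) cnt cost) := by
  induction ps generalizing cnt cost with
  | nil => rfl
  | cons p rest ih => cases p; simp [mbSweep2, mbSweep, ih]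

-- ===== VERDICT (by name: the statement is the Claim_ definition above) =====
theorem moving_balls_spec : Claim_equal_moving_balls := by
  intro boxes _
  unfold Spec_moving_balls moving_balls moving_balls_alt
  simp only []
  set cs := boxes.toList with hcs
  set n := cs.length with hn
  have hlL : (mbSweep cs 0 0).length = n := mbSweep_length cs 0 0
  have hmapsnd : (List.zip cs (mbSweep cs 0 0)).map Prod.snd = mbSweep cs 0 0 :=
    List.map_snd_zip (by rw [hlL])
  have hmapfst : (List.zip cs (mbSweep cs 0 0)).map Prod.fst = cs :=
    List.map_fst_zip (by rw [hlL])
  rw [mbSweep2_eq, List.map_reverse, List.map_reverse, hmapsnd, hmapfst]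
  have hlR : (mbSweep cs.reverse 0 0).length = n := by
    rw [mbSweep_length, List.length_reverse]
  apply List.ext_getElem
  · simp [hlL, hlR]
  · intro i h1 h2
    have hi : i < n := by simpa using h1
    rw [List.getElem_map, List.getElem_range]
    rw [mbA_entry cs i hi]
    rw [List.getElem_reverse]
    rw [List.getElem_zipWith]
    have hlen : (List.zipWith (· + ·) (mbSweep cs 0 0).reverse (mbSweep cs.reverse 0 0)).length = n := by
      simp [hlL, hlR]
    have hk : (List.zipWith (· + ·) (mbSweep cs 0 0).reverse (mbSweep cs.reverse 0 0)).length - 1 - i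
        = n - 1 - i := by rw [hlen]
    simp only [hk]
    rw [List.getElem_reverse]
    have hidx : (mbSweep cs 0 0).length - 1 - (n - 1 - i) = i := by rw [hlL]; omega
    simp only [hidx]
    have hL := mbSweep_getElem cs 0 0 i (by rw [← hn]; exact hi)
    have hR := mbSweep_getElem cs.reverse 0 0 (n - 1 - i) (by rw [List.length_reverse, ← hn]; omega)
    rw [hL, hR, mbP_reverse cs i hi]
    ring
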